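-- pv_equiv track=rewrite | github.com/Aryudesu/ABC | 299/ABC299A.py | calc
-- ===== SOURCE A (Python) =====
-- def calc(S):
--     f = False
--     for s in S:
--         if s == "|":
--             f = not f
--         if f and s == "*":
--             return True
--     return False
-- ===== SOURCE B (Python) =====
-- def calc(S):
--     parts = S.split('|')
--     return any('*' in p for i, p in enumerate(parts) if i % 2 == 1)
-- ===== Notes on version B (the rewrite author's own statement) =====
-- stated objective: faster
-- what changed: Replaces A's flag-toggling character-by-character scan with split('|') into regions and a scan of the odd-indexed segments (those inside a '|'...'|' pair) for '*'; the per-character Python loop is replaced by C-level str.split and substring tests.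
import Mathlib
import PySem

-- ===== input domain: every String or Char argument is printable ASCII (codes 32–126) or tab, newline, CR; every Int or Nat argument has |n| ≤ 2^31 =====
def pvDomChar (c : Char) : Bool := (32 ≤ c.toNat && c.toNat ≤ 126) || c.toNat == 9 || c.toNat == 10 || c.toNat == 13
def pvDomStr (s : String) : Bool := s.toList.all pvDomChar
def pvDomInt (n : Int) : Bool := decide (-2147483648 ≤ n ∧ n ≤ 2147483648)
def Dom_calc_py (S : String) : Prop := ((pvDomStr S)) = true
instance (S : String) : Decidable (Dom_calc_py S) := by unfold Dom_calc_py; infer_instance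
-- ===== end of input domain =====

-- B replaces A's flag-toggling per-character scan by split('|') into regions and a scan of the
-- odd-indexed segments for '*' (timing: measurably faster; C-level split vs per-char loop).

-- ===== PORT A =====
-- the for-loop with early return, state f
def calcAux : List Char → Bool → Bool
  | [], _ => false
  | c :: rest, f =>
    let f' := if c == '|' then !f else f
    if f' && c == '*' then true else calcAux rest f'

def calc_py (S : String) : Bool := calcAux S.toList false

-- ===== PORT B =====
def calc_py_alt (S : String) : Bool :=
  let parts := PySem.Chars.splitOn S.toList "|".toList
  (PySem.List.enumerate parts 0).any (fun ip => ip.1 % 2 == 1 && PySem.Chars.isIn "*".toList ip.2)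

-- ===== PRECONDITION & SPEC =====
def Spec_calc_py (S : String) (out : Bool) : Prop := out = calc_py_alt S
instance (S : String) (out : Bool) : Decidable (Spec_calc_py S out) := by unfold Spec_calc_py; infer_instance

-- ===== CLAIM (what is proved, stated in full; the proofs are below) =====
def Claim_equal_calc_py : Prop := ∀ (S : String), Dom_calc_py S → Spec_calc_py S (calc_py S)

-- ===== LEMMAS AND PROOFS =====

-- structural re-statement of split-on-'|'
def mySplit : List Char → List (List Char)
  | [] => [[]]
  | c :: rest =>
    if c = '|' then [] :: mySplit rest
    else
      match mySplit rest with
      | [] => [[c]]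
      | p :: ps => (c :: p) :: ps

theorem mySplit_ne_nil (l : List Char) : mySplit l ≠ [] := by
  cases l with
  | nil => simp [mySplit]
  | cons c rest =>
    simp only [mySplit]
    split
    · simp
    · cases h : mySplit rest <;> simp

theorem splitOn_go_eq : ∀ (fuel : Nat) (l cur : List Char) (acc : List (List Char)),
    l.length ≤ fuel →
    PySem.Chars.splitOn.go ['|'] fuel l cur acc =
      acc.reverse ++ (cur.reverse ++ (mySplit l).head!) :: (mySplit l).tail := by
  intro fuel
  induction fuel with
  | zero =>
    intro l cur acc h
    have : l = [] := by cases l <;> simp_all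
    subst this
    simp [PySem.Chars.splitOn.go, mySplit]
  | succ n ih =>
    intro l cur acc h
    cases l with
    | nil => simp [PySem.Chars.splitOn.go, mySplit]
    | cons c rest =>
      simp only [PySem.Chars.splitOn.go]
      by_cases hc : c = '|'
      · subst hc
        have hpre : List.isPrefixOf ['|'] ('|' :: rest) = true := by
          simp [List.isPrefixOf]
        rw [if_pos hpre]
        have hlen : rest.length ≤ n := by simp at h; omega
        rw [show List.drop (['|'] : List Char).length ('|' :: rest) = rest from rfl,
          ih rest [] (cur.reverse :: acc) hlen]
        rcases hr : mySplit rest with - | ⟨p, ps⟩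
        · exact absurd hr (mySplit_ne_nil rest)
        · simp [mySplit, hr]
      · have hpre : List.isPrefixOf ['|'] (c :: rest) = false := by
          simp [List.isPrefixOf]
          intro hcc; exact hc hcc.symm
        rw [if_neg (by simp [hpre])]
        have hlen : rest.length ≤ n := by simp at h; omega
        rw [ih rest (c :: cur) acc hlen]
        rcases hr : mySplit rest with - | ⟨p, ps⟩
        · exact absurd hr (mySplit_ne_nil rest)
        · simp [mySplit, hr, hc]

theorem splitOn_eq_mySplit (l : List Char) :
    PySem.Chars.splitOn l ['|'] = mySplit l := by
  have := splitOn_go_eq (l.length + 1) l [] [] (by omega)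
  rw [PySem.Chars.splitOn, this]
  rcases hr : mySplit l with - | ⟨p, ps⟩
  · exact absurd hr (mySplit_ne_nil l)
  · simp

-- alternating-region reading of B's odd-index scan
def altAny : List (List Char) → Bool → Bool
  | [], _ => false
  | p :: ps, f => (f && PySem.Chars.isIn ['*'] p) || altAny ps (!f)

theorem isIn_star_nil : PySem.Chars.isIn ['*'] [] = false := by decide

theorem isIn_star (p : List Char) : PySem.Chars.isIn ['*'] p = p.contains '*' := by
  rw [Bool.eq_iff_iff, PySem.Chars.isIn_iff_infix, List.contains_iff_mem]
  constructor
  · intro h; exact h.mem (by simp)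
  · intro h
    obtain ⟨s, t, rfl⟩ := List.append_of_mem h
    exact ⟨s, t, by simp⟩

theorem calcAux_eq_altAny : ∀ (l : List Char) (f : Bool),
    calcAux l f = altAny (mySplit l) f := by
  intro l
  induction l with
  | nil => intro f; simp [calcAux, mySplit, altAny, isIn_star_nil]
  | cons c rest ih =>
    intro f
    by_cases hc : c = '|'
    · subst hc
      simp [calcAux, mySplit, altAny, ih, isIn_star]
    · rcases hr : mySplit rest with - | ⟨p, ps⟩
      · exact absurd hr (mySplit_ne_nil rest)
      · have hne : (c == '|') = false := by simp [hc]
        simp only [calcAux, mySplit, hne, if_neg hc, hr]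
        simp only [if_neg Bool.false_ne_true]
        have ihr := ih f
        rw [hr] at ihr
        simp only [altAny, isIn_star] at ihr ⊢
        rw [ihr]
        cases f
        · simp
        · by_cases hcs : c = '*'
          · simp [hcs]
          · have : (c == '*') = false := by simp [hcs]
            simp [Ne.symm hcs]
            exact fun h => absurd h hcs

theorem enumerate_any_eq_altAny : ∀ (parts : List (List Char)) (k : Int),
    (PySem.List.enumerate parts k).any
        (fun ip => ip.1 % 2 == 1 && PySem.Chars.isIn ['*'] ip.2)
      = altAny parts (k % 2 == 1) := by
  intro parts
  induction parts with
  | nil => intro k; simp [PySem.List.enumerate_nil, altAny]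
  | cons p ps ih =>
    intro k
    rw [PySem.List.enumerate_cons]
    simp only [List.any_cons, ih, altAny]
    have hmod : ((k + 1) % 2 == 1) = !(k % 2 == 1) := by
      rcases Int.emod_two_eq k with h | h <;> rw [Int.add_emod, h] <;> decide
    rw [hmod]

-- ===== VERDICT (by name: the statement is the Claim_ definition above) =====
theorem calc_py_spec : Claim_equal_calc_py := by
  intro S _
  unfold Spec_calc_py calc_py calc_py_alt
  have h1 : "|".toList = ['|'] := rfl
  have h2 : "*".toList = ['*'] := rfl
  rw [h1, h2, splitOn_eq_mySplit, enumerate_any_eq_altAny, calcAux_eq_altAny]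
  rfl
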